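-- pv_equiv track=rewrite | github.com/Aryanmik/teamflow-ai | teamflow_fastapi/api.py | _strip_api_design
-- ===== SOURCE A (Python) =====
-- def _strip_api_design(content: str) -> str:
--     if not content:
--         return ""
--     lines = content.replace("\r\n", "\n").split("\n")
--     output = []
--     skipping = False
--     inserted = False
--     for raw in lines:
--         stripped = raw.strip()
--         if stripped.startswith("#"):
--             heading = stripped.lstrip("#").strip().lower()
--             if heading.startswith("api design"):
--                 if not inserted:
--                     output.append("## API Design")
--                     output.append("- Refer to teamflow_ide_prompt.md for API details.")
--                     inserted = True
--                 skipping = True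
--                 continue
--             if skipping:
--                 skipping = False
--             output.append(raw)
--             continue
--         if skipping:
--             continue
--         output.append(raw)
--     return "\n".join(output).strip()
-- ===== SOURCE B (Python) =====
-- def _strip_api_design(content: str) -> str:
--     if not content:
--         return ""
--     lines = content.replace("\r\n", "\n").split("\n")
--     # Pass 1: partition into a preamble and heading-led blocks.
--     preamble = []
--     blocks = []
--     current = None
--     for ln in lines:
--         if ln.strip().startswith("#"):
--             if current is not None:
--                 blocks.append(current)
--             current = [ln]
--         elif current is None:
--             preamble.append(ln)
--         else:
--             current.append(ln)
--     if current is not None: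
--         blocks.append(current)
--     # Pass 2: emit blocks, replacing the first 'API Design' block by the
--     # placeholder and dropping any further ones.
--     out = list(preamble)
--     dropped = False
--     for blk in blocks:
--         head = blk[0].strip().lstrip("#").strip().lower()
--         if head.startswith("api design"):
--             if not dropped:
--                 out.append("## API Design")
--                 out.append("- Refer to teamflow_ide_prompt.md for API details.")
--                 dropped = True
--         else:
--             out.extend(blk)
--     return "\n".join(out).strip()
-- ===== Notes on version B (the rewrite author's own statement) =====
-- stated objective: alternative
-- what changed: Replaces A's single flag-driven loop (skipping/inserted state per line) by a two-pass decomposition: first partition the lines into a preamble plus heading-led blocks, then emit the blocks, substituting the placeholder for the first api-design block and dropping later ones.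
import Mathlib
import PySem

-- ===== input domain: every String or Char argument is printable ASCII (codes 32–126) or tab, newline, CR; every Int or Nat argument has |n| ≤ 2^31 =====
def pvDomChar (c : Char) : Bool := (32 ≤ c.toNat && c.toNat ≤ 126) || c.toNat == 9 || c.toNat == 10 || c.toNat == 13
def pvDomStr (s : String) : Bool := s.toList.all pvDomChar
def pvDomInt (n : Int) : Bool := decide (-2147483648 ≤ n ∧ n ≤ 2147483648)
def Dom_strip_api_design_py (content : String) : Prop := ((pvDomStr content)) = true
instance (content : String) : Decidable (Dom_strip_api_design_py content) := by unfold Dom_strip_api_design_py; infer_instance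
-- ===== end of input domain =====

-- B re-implements A with a different decomposition (partition into heading blocks, then emit);
-- same cost; objective: alternative structure.

-- hand port of Python str.lstrip("#") (drop leading '#' characters; exact), shared primitive
def pvLstripHash (s : String) : String :=
  String.ofList (s.toList.dropWhile (· == '#'))

-- raw.strip().startswith("#")  /  <stripped>.lstrip("#").strip().lower().startswith("api design")
def pvIsHead (raw : String) : Bool :=
  PySem.Str.startswith (PySem.Str.strip raw) "#"
def pvIsApi (raw : String) : Bool :=
  PySem.Str.startswith
    (PySem.Str.lower (PySem.Str.strip (pvLstripHash (PySem.Str.strip raw)))) "api design"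

def pvPlaceholder : List String :=
  ["## API Design", "- Refer to teamflow_ide_prompt.md for API details."]

-- ===== PORT A =====
-- A's single flag-driven loop; state = (output, skipping, inserted)
def stripA_loop : List String → List String → Bool → Bool → List String
  | [], output, _, _ => output
  | raw :: rest, output, skipping, inserted =>
    if pvIsHead raw then
      if pvIsApi raw then
        stripA_loop rest (if !inserted then output ++ pvPlaceholder else output) true true
      else
        stripA_loop rest (output ++ [raw]) false inserted
    else if skipping then
      stripA_loop rest output skipping inserted
    else
      stripA_loop rest (output ++ [raw]) skipping inserted

def strip_api_design_py (content : String) : String :=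
  if content == "" then ""
  else
    -- split on "\n": nonempty separator, so split? is always `some`
    let lines := (PySem.Str.split? (PySem.Str.replace content "\r\n" "\n") "\n").getD []
    PySem.Str.strip (PySem.Str.join "\n" (stripA_loop lines [] false false))

-- ===== PORT B =====
-- pass 1 of Source B: partition the lines into (preamble, blocks); state = (preamble, blocks, current)
def stripB_part : List String → List String → List (List String) → Option (List String) →
    List String × List (List String)
  | [], pre, blocks, none => (pre, blocks)
  | [], pre, blocks, some cur => (pre, blocks ++ [cur])
  | ln :: rest, pre, blocks, cur =>
    if pvIsHead ln then
      match cur with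
      | none => stripB_part rest pre blocks (some [ln])
      | some c => stripB_part rest pre (blocks ++ [c]) (some [ln])
    else
      match cur with
      | none => stripB_part rest (pre ++ [ln]) blocks none
      | some c => stripB_part rest pre blocks (some (c ++ [ln]))

-- pass 2 of Source B: emit the blocks (blk[0] is ported as headD "": every block is nonempty)
def stripB_emit : List (List String) → List String → Bool → List String
  | [], out, _ => out
  | blk :: rest, out, dropped =>
    if pvIsApi (blk.headD "") then
      stripB_emit rest (if !dropped then out ++ pvPlaceholder else out) true
    else
      stripB_emit rest (out ++ blk) dropped

def strip_api_design_py_alt (content : String) : String :=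
  if content == "" then ""
  else
    let lines := (PySem.Str.split? (PySem.Str.replace content "\r\n" "\n") "\n").getD []
    let pb := stripB_part lines [] [] none
    PySem.Str.strip (PySem.Str.join "\n" (stripB_emit pb.2 pb.1 false))

-- ===== PRECONDITION & SPEC =====
def Spec_strip_api_design_py (content : String) (out : String) : Prop := out = strip_api_design_py_alt content
instance (content : String) (out : String) : Decidable (Spec_strip_api_design_py content out) := by unfold Spec_strip_api_design_py; infer_instance

-- ===== CLAIM (what is proved, stated in full; the proofs are below) =====
def Claim_equal_strip_api_design_py : Prop := ∀ (content : String), Dom_strip_api_design_py content → Spec_strip_api_design_py content (strip_api_design_py content)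

-- ===== LEMMAS AND PROOFS =====

-- accumulator normalization for A's loop
theorem stripA_loop_acc (lines : List String) (output : List String) (s i : Bool) :
    stripA_loop lines output s i = output ++ stripA_loop lines [] s i := by
  induction lines generalizing output s i with
  | nil => simp [stripA_loop]
  | cons raw rest ih =>
    simp only [stripA_loop]
    split_ifs with h1 h2 h3 h4
    · rw [ih (output ++ pvPlaceholder), ih ([] ++ pvPlaceholder)]; simp
    · exact ih output true true
    · rw [ih (output ++ [raw]), ih ([] ++ [raw])]; simp
    · exact ih output s i
    · rw [ih (output ++ [raw]), ih ([] ++ [raw])]; simp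

-- accumulator normalization for B's partition pass
theorem stripB_part_acc (lines : List String) (pre : List String)
    (blocks : List (List String)) (cur : Option (List String)) :
    stripB_part lines pre blocks cur =
      (pre ++ (stripB_part lines [] [] cur).1, blocks ++ (stripB_part lines [] [] cur).2) := by
  induction lines generalizing pre blocks cur with
  | nil => cases cur <;> simp [stripB_part]
  | cons ln rest ih =>
    cases cur with
    | none =>
      simp only [stripB_part]
      split_ifs with h1
      · exact ih pre blocks (some [ln])
      · rw [ih (pre ++ [ln]) blocks none, ih ([] ++ [ln]) [] none]; simp
    | some c =>
      simp only [stripB_part]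
      split_ifs with h1
      · rw [ih pre (blocks ++ [c]) (some [ln]), ih [] ([] ++ [c]) (some [ln])]; simp
      · exact ih pre blocks (some (c ++ [ln]))

-- accumulator normalization for B's emit pass
theorem stripB_emit_acc (bs : List (List String)) (out : List String) (d : Bool) :
    stripB_emit bs out d = out ++ stripB_emit bs [] d := by
  induction bs generalizing out d with
  | nil => simp [stripB_emit]
  | cons blk rest ih =>
    simp only [stripB_emit]
    split_ifs with h1 h2
    · rw [ih (out ++ pvPlaceholder), ih ([] ++ pvPlaceholder)]; simp
    · exact ih out true
    · rw [ih (out ++ blk), ih ([] ++ blk)]; simp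

-- while a block is open, the preamble no longer grows
theorem stripB_part_pre_some (lines : List String) (c : List String) :
    (stripB_part lines [] [] (some c)).1 = [] := by
  induction lines generalizing c with
  | nil => simp [stripB_part]
  | cons ln rest ih =>
    by_cases h1 : pvIsHead ln
    · simp only [stripB_part, h1, if_true]
      rw [stripB_part_acc rest [] ([] ++ [c]) (some [ln])]
      simp [ih]
    · simp only [stripB_part, h1, Bool.false_eq_true, if_false]
      exact ih (c ++ [ln])

-- cons-accumulator forms (derived; safe as simp rules)
theorem stripA_loop_cons (lines : List String) (a : String) (out : List String) (s i : Bool) :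
    stripA_loop lines (a :: out) s i = a :: stripA_loop lines out s i := by
  rw [stripA_loop_acc lines (a :: out), stripA_loop_acc lines out]; simp

theorem stripB_emit_cons (bs : List (List String)) (a : String) (out : List String) (d : Bool) :
    stripB_emit bs (a :: out) d = a :: stripB_emit bs out d := by
  rw [stripB_emit_acc bs (a :: out), stripB_emit_acc bs out]; simp

-- key lemma: emitting the blocks collected from `lines` with pending block (c :: body)
-- equals A's loop output from the corresponding state
theorem stripB_main (lines : List String) (c : String) (body : List String) (i : Bool) :
    stripB_emit (stripB_part lines [] [] (some (c :: body))).2 [] i =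
      (if pvIsApi c then
        (if !i then pvPlaceholder else []) ++ stripA_loop lines [] true true
      else (c :: body) ++ stripA_loop lines [] false i) := by
  induction lines generalizing c body i with
  | nil =>
    simp only [stripB_part, List.nil_append]
    by_cases h2 : pvIsApi c <;> cases i <;>
      simp [h2, stripB_emit, stripA_loop, pvPlaceholder]
  | cons ln rest ih =>
    by_cases h1 : pvIsHead ln
    · simp only [stripB_part, h1, if_true]
      rw [stripB_part_acc rest [] ([] ++ [c :: body]) (some [ln])]
      simp only [List.nil_append, List.singleton_append]
      by_cases h2 : pvIsApi c <;> by_cases h3 : pvIsApi ln <;> cases i <;>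
        simp [stripB_emit, stripA_loop, h1, h2, h3, ih, pvPlaceholder,
          stripB_emit_cons, stripA_loop_cons] <;>
        (rw [stripB_emit_acc _ body]; simp [ih, h3, pvPlaceholder])
    · simp only [stripB_part, h1, Bool.false_eq_true, if_false, List.cons_append]
      rw [ih c (body ++ [ln]) i]
      by_cases h2 : pvIsApi c <;> cases i <;>
        simp [stripA_loop, h1, h2, stripA_loop_cons]

-- preamble phase: B's two passes agree with A's loop from the initial state
theorem stripB_pre (lines : List String) :
    (stripB_part lines [] [] none).1 ++ stripB_emit (stripB_part lines [] [] none).2 [] false =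
      stripA_loop lines [] false false := by
  induction lines with
  | nil => simp [stripB_part, stripB_emit, stripA_loop]
  | cons ln rest ih =>
    by_cases h1 : pvIsHead ln
    · simp only [stripB_part, h1, if_true]
      rw [stripB_main rest ln [] false]
      by_cases h2 : pvIsApi ln <;>
        simp [stripA_loop, h1, h2, pvPlaceholder, stripA_loop_cons, stripB_part_pre_some]
    · simp only [stripB_part, h1, Bool.false_eq_true, if_false]
      rw [stripB_part_acc rest ([] ++ [ln]) [] none]
      simp only [List.nil_append, List.singleton_append]
      simp [stripA_loop, h1, stripA_loop_cons, ih]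

-- ===== VERDICT (by name: the statement is the Claim_ definition above) =====
theorem strip_api_design_py_spec : Claim_equal_strip_api_design_py := by
  intro content _
  unfold Spec_strip_api_design_py strip_api_design_py strip_api_design_py_alt
  split_ifs with h
  · rfl
  · simp only [stripB_emit_acc _ (stripB_part _ [] [] none).1, stripB_pre]
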